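-- pv_equiv track=rewrite | github.com/FilippTrigub/imaginary-product-landing | coding_challenges.py | validate_encryption_level
-- ===== SOURCE A (Python) =====
-- def validate_encryption_level(password):
--     """
--     Determine the encryption level of a password.
--
--     Args:
--         password: String to validate
--
--     Returns:
--         Integer (0-4) representing the encryption level
--     """
--     special_chars = "!@#$%^&*"
--     level = 0
--
--     # Level 1: At least 6 characters
--     if len(password) >= 6:
--         level = 1
--
--     # Level 2: At least 8 characters, contains digit
--     if len(password) >= 8 and any(char.isdigit() for char in password):
--         level = 2
--
--     # Level 3: At least 10 characters, uppercase, lowercase, digit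
--     if (len(password) >= 10 and
--         any(char.isupper() for char in password) and
--         any(char.islower() for char in password) and
--         any(char.isdigit() for char in password)):
--         level = 3
--
--     # Level 4: At least 12 characters, uppercase, lowercase, digit, special
--     if (len(password) >= 12 and
--         any(char.isupper() for char in password) and
--         any(char.islower() for char in password) and
--         any(char.isdigit() for char in password) and
--         any(char in special_chars for char in password)):
--         level = 4
--
--     return level
-- ===== SOURCE B (Python) =====
-- def validate_encryption_level(password):
--     """Single pass over the password collecting character-class flags,
--     then one cascade of tier checks (highest first)."""
--     special_chars = "!@#$%^&*"
--     has_upper = has_lower = has_digit = has_special = False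
--     for char in password:
--         has_upper = has_upper or char.isupper()
--         has_lower = has_lower or char.islower()
--         has_digit = has_digit or char.isdigit()
--         has_special = has_special or (char in special_chars)
--     n = len(password)
--     if n >= 12 and has_upper and has_lower and has_digit and has_special:
--         return 4
--     if n >= 10 and has_upper and has_lower and has_digit:
--         return 3
--     if n >= 8 and has_digit:
--         return 2
--     if n >= 6:
--         return 1
--     return 0
-- ===== Notes on version B (the rewrite author's own statement) =====
-- stated objective: simpler
-- what changed: B replaces A's repeated any() scans per tier with one explicit pass collecting has_upper/has_lower/has_digit/has_special flags, then an early-return cascade from the highest tier down instead of A's level-overwrite sequence.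
import Mathlib
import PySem

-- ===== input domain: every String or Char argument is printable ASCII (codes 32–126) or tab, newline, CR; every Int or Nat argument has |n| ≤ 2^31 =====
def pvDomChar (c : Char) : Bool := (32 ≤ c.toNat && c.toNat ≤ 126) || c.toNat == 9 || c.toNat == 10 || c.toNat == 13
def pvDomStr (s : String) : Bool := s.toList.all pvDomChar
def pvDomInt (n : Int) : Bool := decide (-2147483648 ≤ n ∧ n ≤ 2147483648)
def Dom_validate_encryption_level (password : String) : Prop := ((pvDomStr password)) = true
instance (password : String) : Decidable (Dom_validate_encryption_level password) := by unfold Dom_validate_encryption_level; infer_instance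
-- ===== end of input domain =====

-- B collapses A's per-tier any() rescans into one flag-collecting pass plus a highest-first cascade (objective: simpler).

-- ===== PORT A =====
def validate_encryption_level (password : String) : Int :=
  let special_chars : List Char := "!@#$%^&*".toList
  let cs := password.toList
  let level : Int := 0
  let level := if 6 ≤ cs.length then 1 else level
  let level := if 8 ≤ cs.length ∧ cs.any PySem.Chars.isdigit then 2 else level
  let level := if 10 ≤ cs.length ∧ cs.any PySem.Chars.isupper ∧ cs.any PySem.Chars.islower ∧
                  cs.any PySem.Chars.isdigit then 3 else level
  let level := if 12 ≤ cs.length ∧ cs.any PySem.Chars.isupper ∧ cs.any PySem.Chars.islower ∧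
                  cs.any PySem.Chars.isdigit ∧ cs.any (fun c => PySem.Chars.isIn [c] special_chars) then 4 else level
  level

-- ===== PORT B =====
def validate_encryption_level_alt (password : String) : Int :=
  let special_chars : List Char := "!@#$%^&*".toList
  let f := password.toList.foldl
    (fun (st : Bool × Bool × Bool × Bool) c =>
      (st.1 || PySem.Chars.isupper c,
       st.2.1 || PySem.Chars.islower c,
       st.2.2.1 || PySem.Chars.isdigit c,
       st.2.2.2 || PySem.Chars.isIn [c] special_chars))
    (false, false, false, false)
  let n := password.toList.length
  if 12 ≤ n ∧ f.1 ∧ f.2.1 ∧ f.2.2.1 ∧ f.2.2.2 then 4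
  else if 10 ≤ n ∧ f.1 ∧ f.2.1 ∧ f.2.2.1 then 3
  else if 8 ≤ n ∧ f.2.2.1 then 2
  else if 6 ≤ n then 1
  else 0

-- ===== PRECONDITION & SPEC =====
def Spec_validate_encryption_level (password : String) (out : Int) : Prop := out = validate_encryption_level_alt password
instance (password : String) (out : Int) : Decidable (Spec_validate_encryption_level password out) := by unfold Spec_validate_encryption_level; infer_instance

-- ===== CLAIM (what is proved, stated in full; the proofs are below) =====
def Claim_equal_validate_encryption_level : Prop := ∀ (password : String), Dom_validate_encryption_level password → Spec_validate_encryption_level password (validate_encryption_level password)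

-- ===== LEMMAS AND PROOFS =====

/-- The flag-collecting fold of B computes exactly the four `any` scans of A. -/
theorem pv_fold_flags (l : List Char) (a b d s : Bool) :
    l.foldl
      (fun (st : Bool × Bool × Bool × Bool) c =>
        (st.1 || PySem.Chars.isupper c,
         st.2.1 || PySem.Chars.islower c,
         st.2.2.1 || PySem.Chars.isdigit c,
         st.2.2.2 || PySem.Chars.isIn [c] "!@#$%^&*".toList))
      (a, b, d, s)
    = (a || l.any PySem.Chars.isupper,
       b || l.any PySem.Chars.islower,
       d || l.any PySem.Chars.isdigit,
       s || l.any (fun c => PySem.Chars.isIn [c] "!@#$%^&*".toList)) := by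
  induction l generalizing a b d s with
  | nil => simp
  | cons x xs ih =>
      rw [List.foldl_cons, ih]
      simp [List.any_cons, Bool.or_assoc]

-- ===== VERDICT (by name: the statement is the Claim_ definition above) =====
theorem validate_encryption_level_spec : Claim_equal_validate_encryption_level := by
  intro password _
  unfold Spec_validate_encryption_level validate_encryption_level validate_encryption_level_alt
  simp only [pv_fold_flags, Bool.false_or]
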